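-- pv_equiv track=rewrite | github.com/wooseoking/Algorithm | DynamicProgramming/Jing gum dari.py | solution
-- ===== SOURCE A (Python) =====
-- def solution(stones, k):
--     answer = 0
--     left =1
--     right=max(stones)
--
--     while left <=right:
--         mid = (left+right)//2
--         zeros =0
--         max_zeros = 0
--         for ele in stones:
--             if ele - mid <0:
--                 zeros+=1
--                 if max_zeros <zeros:max_zeros = zeros
--             else :zeros = 0
--         #가능한 경우
--         if max_zeros<k:
--             answer = mid
--             left = mid+1
--         else :right = mid-1
--     return answer
-- ===== SOURCE B (Python) =====
-- def solution(stones, k):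
--     # Closed form: the answer is the minimum over all k-windows of the window
--     # maximum (clamped to 0 from below); no binary search needed.
--     if k <= 0:
--         return 0
--     n = len(stones)
--     mx = max(stones)
--     if k > n:
--         return mx if mx > 0 else 0
--     m = mx
--     for i in range(n - k + 1):
--         w = max(stones[i:i + k])
--         if w < m:
--             m = w
--     return m if m > 0 else 0
-- ===== Notes on version B (the rewrite author's own statement) =====
-- stated objective: alternative
-- what changed: Replaces the binary search over candidate thresholds (each re-scanning all stones for the longest run below the threshold) by a closed form: the answer is the minimum over all k-windows of the window maximum, clamped below by 0.
import Mathlib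
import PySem

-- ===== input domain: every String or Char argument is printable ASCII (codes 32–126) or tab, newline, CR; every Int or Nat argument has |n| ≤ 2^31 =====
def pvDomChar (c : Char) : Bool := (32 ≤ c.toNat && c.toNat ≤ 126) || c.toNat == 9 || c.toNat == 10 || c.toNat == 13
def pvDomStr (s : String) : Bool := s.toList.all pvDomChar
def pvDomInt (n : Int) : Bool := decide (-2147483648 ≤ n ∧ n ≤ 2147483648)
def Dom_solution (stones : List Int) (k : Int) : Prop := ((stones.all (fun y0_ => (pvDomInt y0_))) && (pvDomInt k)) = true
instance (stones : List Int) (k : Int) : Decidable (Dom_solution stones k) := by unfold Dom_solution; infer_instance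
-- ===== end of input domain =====

-- B replaces A's binary search by the closed form "min over k-windows of the window maximum"; same value on every nonempty stones list.

-- ===== PORT A =====
-- inner 'for ele in stones' loop of A: state (zeros, max_zeros)
def solutionRun (stones : List Int) (mid : Int) : Int × Int :=
  stones.foldl
    (fun (st : Int × Int) ele =>
      if ele - mid < 0 then
        (st.1 + 1, if st.2 < st.1 + 1 then st.1 + 1 else st.2)
      else (0, st.2))
    (0, 0)

-- outer 'while left <= right' loop of A
def solutionLoop (stones : List Int) (k left right answer : Int) : Int :=
  if h : left ≤ right then
    let mid := PySem.Int.floordiv (left + right) 2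
    if (solutionRun stones mid).2 < k then
      solutionLoop stones k (mid + 1) right mid
    else
      solutionLoop stones k left (mid - 1) answer
  else answer
termination_by (right + 1 - left).toNat
decreasing_by
  · have := PySem.Int.floordiv_two_mid_bounds h; omega
  · have := PySem.Int.floordiv_two_mid_bounds h; omega

def solution (stones : List Int) (k : Int) : Int :=
  solutionLoop stones k 1 ((PySem.List.max? stones (fun x => x)).getD 0) 0

-- ===== PORT B =====
def solution_alt (stones : List Int) (k : Int) : Int :=
  if k ≤ 0 then 0
  else
    let n : Int := stones.length
    let mx : Int := (PySem.List.max? stones (fun x => x)).getD 0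
    if n < k then (if 0 < mx then mx else 0)
    else
      let m : Int :=
        (PySem.List.pyRange 0 (n - k + 1) 1).foldl
          (fun m i =>
            let w := (PySem.List.max? (PySem.List.slice stones (some i) (some (i + k)))
                        (fun x => x)).getD 0
            if w < m then w else m)
          mx
      if 0 < m then m else 0

-- ===== PRECONDITION & SPEC =====
-- Pre_ excludes only the empty stones list, on which Python's max(stones) raises ValueError.
def Pre_solution (stones : List Int) (k : Int) : Prop := stones ≠ []
instance (stones : List Int) (k : Int) : Decidable (Pre_solution stones k) := by
  unfold Pre_solution; infer_instance
def pvWitness_solution : List Int × Int := ([2, 4, 5, 3, 2, 1, 4, 2, 5, 1], 3)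

def Spec_solution (stones : List Int) (k : Int) (out : Int) : Prop := out = solution_alt stones k
instance (stones : List Int) (k : Int) (out : Int) : Decidable (Spec_solution stones k out) := by
  unfold Spec_solution; infer_instance

-- ===== CLAIM (what is proved, stated in full; the proofs are below) =====
def Claim_equal_solution : Prop := ∀ (stones : List Int) (k : Int), Dom_solution stones k → Pre_solution stones k → Spec_solution stones k (solution stones k)

-- ===== LEMMAS AND PROOFS =====


-- ----- helpers about A's inner loop (max run of stones below mid) -----

def runStep (mid : Int) (st : Int × Int) (ele : Int) : Int × Int :=
  if ele - mid < 0 then (st.1 + 1, if st.2 < st.1 + 1 then st.1 + 1 else st.2)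
  else (0, st.2)

theorem solutionRun_eq (stones : List Int) (mid : Int) :
    solutionRun stones mid = stones.foldl (runStep mid) (0, 0) := rfl

-- "every k-window of xs contains an element ≥ mid"
def WinOK (mid : Int) (K : Nat) (xs : List Int) : Prop :=
  ∀ i : Nat, i + K ≤ xs.length → ∃ x ∈ (xs.drop i).take K, mid ≤ x

theorem winOK_cons (mid : Int) (K : Nat) (x : Int) (t : List Int) :
    WinOK mid K (x :: t) ↔
      ((K ≤ t.length + 1 → ∃ y ∈ (x :: t).take K, mid ≤ y) ∧ WinOK mid K t) := by
  constructor
  · intro h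
    refine ⟨fun hK => ?_, fun i hi => ?_⟩
    · simpa using h 0 (by simp; omega)
    · have := h (i + 1) (by simp; omega)
      simpa using this
  · rintro ⟨h0, h⟩ i hi
    match i with
    | 0 => simpa using h0 (by simp at hi; omega)
    | i + 1 =>
      have := h i (by simp at hi; omega)
      simpa using this

theorem exists_big_of_takeWhile_lt (p : Int → Bool) :
    ∀ (l : List Int) (j : Nat), (l.takeWhile p).length < j → j ≤ l.length →
      ∃ x ∈ l.take j, p x = false := by
  intro l
  induction l with
  | nil => intro j h1 h2; simp at h2; omega
  | cons x t ih =>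
    intro j h1 h2
    by_cases hp : p x
    · simp [List.takeWhile_cons, hp] at h1
      match j with
      | 0 => omega
      | j + 1 =>
        obtain ⟨y, hy, hpy⟩ := ih j (by omega) (by simp at h2; omega)
        exact ⟨y, by simp [hy], hpy⟩
    · simp [hp] at h1
      obtain ⟨j', rfl⟩ : ∃ j', j = j' + 1 := ⟨j - 1, by omega⟩
      exact ⟨x, by simp, by simpa using hp⟩

theorem all_of_take_le_takeWhile (p : Int → Bool) :
    ∀ (l : List Int) (j : Nat), j ≤ (l.takeWhile p).length →
      ∀ x ∈ l.take j, p x = true := by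
  intro l
  induction l with
  | nil => intro j _ x hx; simp at hx
  | cons a t ih =>
    intro j hj x hx
    by_cases hp : p a
    · simp [List.takeWhile_cons, hp] at hj
      match j with
      | 0 => simp at hx
      | j + 1 =>
        simp at hx
        rcases hx with rfl | hx
        · exact hp
        · exact ih j (by omega) x hx
    · simp [List.takeWhile_cons, hp] at hj
      have hj0 : j = 0 := by omega
      subst hj0
      simp at hx

-- WinOK forces the small-prefix to be shorter than K (when a window fits)
theorem spl_lt_of_winOK (mid : Int) (K : Nat) (hK : 1 ≤ K) (t : List Int)
    (h : WinOK mid K t) :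
    ((t.takeWhile (fun x => decide (x - mid < 0))).length : Int) < (K : Int) := by
  by_cases hlen : K ≤ t.length
  · by_contra hge
    obtain ⟨x, hx, hbig⟩ := h 0 (by simpa using hlen)
    have := all_of_take_le_takeWhile (fun x => decide (x - mid < 0)) t K (by omega) x
      (by simpa using hx)
    simp at this
    omega
  · have := List.IsPrefix.length_le (List.takeWhile_prefix (l := t)
      (p := fun x => decide (x - mid < 0)))
    omega

-- the key characterization of A's inner loop, generalized over the state
theorem runAux_lt_iff (mid k : Int) (hk : 1 ≤ k) :
    ∀ (xs : List Int) (z m : Int), 0 ≤ z → z ≤ m →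
      ((xs.foldl (runStep mid) (z, m)).2 < k ↔
        m < k ∧ ((xs.takeWhile (fun x => decide (x - mid < 0))).length : Int) < k - z ∧
          WinOK mid k.toNat xs) := by
  intro xs
  induction xs with
  | nil =>
    intro z m hz hzm
    simp only [List.foldl_nil, List.takeWhile_nil]
    constructor
    · intro h
      refine ⟨h, by simpa using (by omega : z < k), ?_⟩
      intro i hi
      simp at hi
      omega
    · rintro ⟨h, _, _⟩; exact h
  | cons x t ih =>
    intro z m hz hzm
    rw [winOK_cons]
    by_cases hx : x - mid < 0
    · have hxs : (fun y => decide (y - mid < 0)) x = true := by simpa using hx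
      rw [List.foldl_cons]
      have hstep : runStep mid (z, m) x = (z + 1, if m < z + 1 then z + 1 else m) := by
        simp [runStep, hx]
      have htw : (x :: t).takeWhile (fun y => decide (y - mid < 0))
          = x :: t.takeWhile (fun y => decide (y - mid < 0)) := by
        simp [List.takeWhile_cons]; omega
      rw [hstep, htw, List.length_cons]
      have ih' := ih (z + 1) (if m < z + 1 then z + 1 else m) (by omega)
        (by split <;> omega)
      rw [ih']
      have hsplt : (0 : Int) ≤ ((t.takeWhile (fun y => decide (y - mid < 0))).length : Int) :=
        Int.natCast_nonneg _
      constructor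
      · rintro ⟨h1, h2, h3⟩
        refine ⟨by split at h1 <;> omega, by push_cast; omega, fun _ => ?_, h3⟩
        -- first window of x :: t contains a big element
        by_cases hlen : k.toNat ≤ (x :: t).length
        · obtain ⟨y, hy, hby⟩ := exists_big_of_takeWhile_lt
            (fun y => decide (y - mid < 0)) (x :: t) k.toNat
            (by rw [htw, List.length_cons]; omega) hlen
          refine ⟨y, hy, ?_⟩
          simp at hby
          omega
        · simp at hlen; omega
      · rintro ⟨h1, h2, _, h4⟩
        push_cast at h2
        refine ⟨?_, by omega, h4⟩
        have : z + 1 < k := by omega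
        split <;> omega
    · have hxs : (fun y => decide (y - mid < 0)) x = false := by simpa using hx
      rw [List.foldl_cons]
      have hstep : runStep mid (z, m) x = (0, m) := by simp [runStep, hx]
      have htw : (x :: t).takeWhile (fun y => decide (y - mid < 0)) = [] := by
        simp [List.takeWhile_cons]; omega
      rw [hstep, htw]
      have ih' := ih 0 m (by omega) (by omega)
      rw [ih']
      simp only [List.length_nil, Int.natCast_zero]
      constructor
      · rintro ⟨h1, h2, h3⟩
        refine ⟨h1, by omega, fun hK => ?_, h3⟩
        refine ⟨x, ?_, by omega⟩
        have : 1 ≤ k.toNat := by omega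
        match hK' : k.toNat with
        | 0 => omega
        | K + 1 => simp
      · rintro ⟨h1, h2, _, h4⟩
        have := spl_lt_of_winOK mid k.toNat (by omega) t h4
        exact ⟨h1, by omega, h4⟩

theorem run_lt_iff (stones : List Int) (mid k : Int) (hk : 1 ≤ k) :
    ((solutionRun stones mid).2 < k ↔ WinOK mid k.toNat stones) := by
  rw [solutionRun_eq, runAux_lt_iff mid k hk stones 0 0 le_rfl le_rfl]
  constructor
  · rintro ⟨_, _, h⟩; exact h
  · intro h
    have h2 := spl_lt_of_winOK mid k.toNat (by omega) stones h
    exact ⟨by omega, by omega, h⟩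

-- the run value never exceeds max m (z + length)
theorem run_le (mid : Int) :
    ∀ (xs : List Int) (z m : Int), 0 ≤ z →
      (xs.foldl (runStep mid) (z, m)).2 ≤ max m (z + xs.length) := by
  intro xs
  induction xs with
  | nil => intro z m hz; simp
  | cons x t ih =>
    intro z m hz
    rw [List.foldl_cons]
    by_cases hx : x - mid < 0
    · have hstep : runStep mid (z, m) x = (z + 1, if m < z + 1 then z + 1 else m) := by
        simp [runStep, hx]
      rw [hstep]
      by_cases hmz : m < z + 1
      · rw [if_pos hmz]
        have := ih (z + 1) (z + 1) (by omega)
        simp only [List.length_cons] at this ⊢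
        push_cast at this ⊢
        omega
      · rw [if_neg hmz]
        have := ih (z + 1) m (by omega)
        simp only [List.length_cons] at this ⊢
        push_cast at this ⊢
        omega
    · have hstep : runStep mid (z, m) x = (0, m) := by simp [runStep, hx]
      rw [hstep]
      have := ih 0 m le_rfl
      simp only [List.length_cons] at this ⊢
      push_cast at this ⊢
      omega

-- ----- the binary-search loop of A -----

theorem loop_eq (stones : List Int) (k T : Int) :
    ∀ (N : Nat) (l r ans : Int), (r + 1 - l).toNat ≤ N →
      (∀ m, l ≤ m → m ≤ r → ((solutionRun stones m).2 < k ↔ m ≤ T)) →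
      solutionLoop stones k l r ans =
        if l ≤ r then (if T < l then ans else min r T) else ans := by
  intro N
  induction N with
  | zero =>
    intro l r ans hN hT
    have hlr : ¬ l ≤ r := by omega
    rw [solutionLoop, dif_neg hlr, if_neg hlr]
  | succ N ih =>
    intro l r ans hN hT
    by_cases hlr : l ≤ r
    · obtain ⟨hml, hmr⟩ := PySem.Int.floordiv_two_mid_bounds hlr
      set mid := PySem.Int.floordiv (l + r) 2 with hmid
      rw [solutionLoop, dif_pos hlr]
      by_cases hc : (solutionRun stones mid).2 < k
      · rw [if_pos hc]
        have hmidT : mid ≤ T := (hT mid (by omega) (by omega)).1 hc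
        rw [ih (mid + 1) r mid (by omega)
          (fun m h1 h2 => hT m (by omega) h2)]
        rw [if_pos hlr]
        split_ifs <;> omega
      · rw [if_neg hc]
        have hmidT : T < mid := by
          by_contra hle
          exact hc ((hT mid (by omega) (by omega)).2 (by omega))
        rw [ih l (mid - 1) ans (by omega)
          (fun m h1 h2 => hT m h1 (by omega))]
        rw [if_pos hlr]
        split_ifs <;> omega
    · rw [solutionLoop, dif_neg hlr, if_neg hlr]

-- ----- helpers for B's fold -----

theorem le_foldl_min_iff (w : Int → Int) :
    ∀ (l : List Int) (init q : Int),
      (q ≤ l.foldl (fun m i => if w i < m then w i else m) init ↔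
        q ≤ init ∧ ∀ i ∈ l, q ≤ w i) := by
  intro l
  induction l with
  | nil => intro init q; simp
  | cons x t ih =>
    intro init q
    rw [List.foldl_cons]
    by_cases hwx : w x < init
    · rw [if_pos hwx, ih]
      constructor
      · rintro ⟨h1, h2⟩
        refine ⟨by omega, fun i hi => ?_⟩
        rcases List.mem_cons.1 hi with rfl | hi
        · omega
        · exact h2 i hi
      · rintro ⟨h1, h2⟩
        exact ⟨h2 x (List.mem_cons_self ..), fun i hi => h2 i (List.mem_cons_of_mem _ hi)⟩
    · rw [if_neg hwx, ih]
      constructor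
      · rintro ⟨h1, h2⟩
        refine ⟨h1, fun i hi => ?_⟩
        rcases List.mem_cons.1 hi with rfl | hi
        · omega
        · exact h2 i hi
      · rintro ⟨h1, h2⟩
        exact ⟨h1, fun i hi => h2 i (List.mem_cons_of_mem _ hi)⟩

theorem foldl_min_le_init (w : Int → Int) :
    ∀ (l : List Int) (init : Int),
      l.foldl (fun m i => if w i < m then w i else m) init ≤ init := by
  intro l
  induction l with
  | nil => intro init; simp
  | cons x t ih =>
    intro init
    rw [List.foldl_cons]
    by_cases hwx : w x < init
    · rw [if_pos hwx]
      have := ih (w x)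
      omega
    · rw [if_neg hwx]
      exact ih init

theorem le_maxD_iff (l : List Int) (h : l ≠ []) (q : Int) :
    (q ≤ (PySem.List.max? l (fun x => x)).getD 0 ↔ ∃ x ∈ l, q ≤ x) := by
  cases hm : PySem.List.max? l (fun x => x) with
  | none => exact absurd ((PySem.List.max?_eq_none_iff l _).1 hm) h
  | some v =>
    simp only [Option.getD_some]
    constructor
    · intro hq; exact ⟨v, PySem.List.max?_mem hm, hq⟩
    · rintro ⟨x, hx, hq⟩
      have := PySem.List.max?_isMax hm x hx
      omega


-- state's second component never decreases along A's inner loop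
theorem run_snd_ge (mid : Int) :
    ∀ (xs : List Int) (z m : Int), m ≤ (xs.foldl (runStep mid) (z, m)).2 := by
  intro xs
  induction xs with
  | nil => intro z m; simp
  | cons x t ih =>
    intro z m
    rw [List.foldl_cons]
    by_cases hx : x - mid < 0
    · have hstep : runStep mid (z, m) x = (z + 1, if m < z + 1 then z + 1 else m) := by
        simp [runStep, hx]
      rw [hstep]
      have h2 : m ≤ (if m < z + 1 then z + 1 else m) := by split <;> omega
      exact le_trans h2 (ih (z + 1) _)
    · have hstep : runStep mid (z, m) x = (0, m) := by simp [runStep, hx]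
      rw [hstep]
      exact ih 0 m

-- B's per-window maximum
def wMaxB (stones : List Int) (k : Int) (i : Int) : Int :=
  (PySem.List.max? (PySem.List.slice stones (some i) (some (i + k))) (fun x => x)).getD 0

theorem wMaxB_le_iff (stones : List Int) (k : Int) (hk : 1 ≤ k) (i : Int)
    (hi0 : 0 ≤ i) (hiK : i.toNat + k.toNat ≤ stones.length) (mid : Int) :
    (mid ≤ wMaxB stones k i ↔ ∃ x ∈ (stones.drop i.toNat).take k.toNat, mid ≤ x) := by
  have hslice : PySem.List.slice stones (some i) (some (i + k))
      = List.take k.toNat (List.drop i.toNat stones) := by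
    rw [PySem.List.slice_toNat stones hi0 (by omega)]
    congr 1
    omega
  have hne : List.take k.toNat (List.drop i.toNat stones) ≠ [] := by
    intro hnil
    have hlen := congrArg List.length hnil
    simp at hlen
    omega
  unfold wMaxB
  rw [hslice, le_maxD_iff _ hne]

-- ===== VERDICT (by name: the statements are the Claim_ definitions above) =====
theorem solution_spec : Claim_equal_solution := by
  intro stones k _ _
  unfold Spec_solution
  show solutionLoop stones k 1 ((PySem.List.max? stones (fun x => x)).getD 0) 0
      = solution_alt stones k
  set mx := (PySem.List.max? stones (fun x => x)).getD 0 with hmx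
  by_cases hk0 : k ≤ 0
  · -- A's condition never holds: answer stays 0; B returns 0 at its guard
    have hB : solution_alt stones k = 0 := by
      unfold solution_alt
      rw [if_pos hk0]
    rw [hB]
    have hT : ∀ m, (1:Int) ≤ m → m ≤ mx → ((solutionRun stones m).2 < k ↔ m ≤ (0:Int)) := by
      intro m h1 _
      have h0 := run_snd_ge m stones 0 0
      rw [solutionRun_eq]
      constructor
      · intro h; omega
      · intro h; omega
    rw [loop_eq stones k 0 mx.toNat 1 mx 0 (by omega) hT]
    split_ifs <;> omega
  · have hk1 : 1 ≤ k := by omega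
    by_cases hnk : (stones.length : Int) < k
    · -- k exceeds the number of stones: every mid works; answer is max(stones) clamped
      have hB : solution_alt stones k = if 0 < mx then mx else 0 := by
        show (if k ≤ 0 then 0 else if (stones.length : Int) < k then (if 0 < mx then mx else 0)
          else _) = _
        rw [if_neg hk0, if_pos hnk]
      rw [hB]
      have hT : ∀ m, (1:Int) ≤ m → m ≤ mx → ((solutionRun stones m).2 < k ↔ m ≤ mx) := by
        intro m _ h2
        refine ⟨fun _ => h2, fun _ => ?_⟩
        rw [solutionRun_eq]
        have := run_le m stones 0 0 le_rfl
        omega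
      rw [loop_eq stones k mx mx.toNat 1 mx 0 (by omega) hT]
      split_ifs <;> omega
    · -- main case: at least one k-window exists
      have hB : solution_alt stones k =
          (if 0 < (PySem.List.pyRange 0 ((stones.length : Int) - k + 1) 1).foldl
                (fun m i => if wMaxB stones k i < m then wMaxB stones k i else m) mx
            then (PySem.List.pyRange 0 ((stones.length : Int) - k + 1) 1).foldl
                (fun m i => if wMaxB stones k i < m then wMaxB stones k i else m) mx
            else 0) := by
        show (if k ≤ 0 then 0 else if (stones.length : Int) < k then (if 0 < mx then mx else 0)
          else _) = _
        rw [if_neg hk0, if_neg hnk]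
        rfl
      rw [hB]
      set R := PySem.List.pyRange 0 ((stones.length : Int) - k + 1) 1 with hR
      set F := R.foldl (fun m i => if wMaxB stones k i < m then wMaxB stones k i else m) mx
        with hF
      have hwin : ∀ mid : Int, (WinOK mid k.toNat stones ↔ ∀ i ∈ R, mid ≤ wMaxB stones k i) := by
        intro mid
        constructor
        · intro h i hi
          rw [hR, PySem.List.mem_pyRange_one] at hi
          obtain ⟨hi0, hi1⟩ := hi
          rw [wMaxB_le_iff stones k hk1 i hi0 (by omega) mid]
          exact h i.toNat (by omega)
        · intro h i hiK
          have hmem : (i : Int) ∈ R := by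
            rw [hR, PySem.List.mem_pyRange_one]
            omega
          have := h (i : Int) hmem
          rw [wMaxB_le_iff stones k hk1 (i : Int) (by omega) (by simp; omega) mid] at this
          simpa using this
      have hT : ∀ m, (1:Int) ≤ m → m ≤ mx → ((solutionRun stones m).2 < k ↔ m ≤ F) := by
        intro mid _ h2
        rw [run_lt_iff stones mid k hk1, hwin mid, hF, le_foldl_min_iff]
        constructor
        · intro h; exact ⟨h2, h⟩
        · rintro ⟨_, h⟩; exact h
      have hle : F ≤ mx := foldl_min_le_init (wMaxB stones k) R mx
      rw [loop_eq stones k F mx.toNat 1 mx 0 (by omega) hT]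
      split_ifs <;> omega
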